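-- pv_equiv track=rewrite | github.com/zhujintao666/AutoDSL-Sampling | src/sample_fact_rules.py | _pick_capacity
-- ===== SOURCE A (Python) =====
-- from typing import Dict, Any, List
--
-- CAP_STEMS     = ["capacity", "storage", "store", "shelf", "warehouse"]
--
-- def _is_capacity_like(name: str) -> bool:
--     low = name.lower()
--     return any(stem in low for stem in CAP_STEMS)
--
-- def _pick_capacity(self_props: List[str]) -> str:
--     # Prefer something包含 'Capacity' 的；否则任何命中 CAP_STEMS 的
--     for p in self_props:
--         if "Capacity" in p:
--             return p
--     for p in self_props:
--         if _is_capacity_like(p):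
--             return p
--     return ""
-- ===== SOURCE B (Python) =====
-- from typing import List
--
-- CAP_STEMS = ["capacity", "storage", "store", "shelf", "warehouse"]
--
-- def _pick_capacity(self_props: List[str]) -> str:
--     # Single pass: return the first exact 'Capacity' hit immediately,
--     # remembering the first stem-like property as a fallback.
--     fallback = None
--     for p in self_props:
--         if "Capacity" in p:
--             return p
--         if fallback is None:
--             low = p.lower()
--             if any(stem in low for stem in CAP_STEMS):
--                 fallback = p
--     return fallback if fallback is not None else ""
-- ===== Notes on version B (the rewrite author's own statement) =====
-- stated objective: alternative
-- what changed: Replaces A's two sequential scans (exact-'Capacity' scan, then stem scan) by one pass that returns an exact hit immediately while recording the first stem-like property as a fallback.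
import Mathlib
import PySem

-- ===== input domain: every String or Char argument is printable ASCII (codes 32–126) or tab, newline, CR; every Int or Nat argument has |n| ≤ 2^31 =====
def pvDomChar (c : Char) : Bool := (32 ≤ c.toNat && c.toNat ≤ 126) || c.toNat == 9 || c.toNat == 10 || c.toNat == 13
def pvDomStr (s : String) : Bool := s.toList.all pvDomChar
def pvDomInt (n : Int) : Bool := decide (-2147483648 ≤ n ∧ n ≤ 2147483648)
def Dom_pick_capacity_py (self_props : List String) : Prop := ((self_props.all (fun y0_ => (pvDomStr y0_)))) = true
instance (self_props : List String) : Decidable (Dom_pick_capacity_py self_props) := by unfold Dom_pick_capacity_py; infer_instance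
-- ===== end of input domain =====

-- B merges A's two sequential scans into one pass keeping a first-stem-hit fallback; exact equivalence proved.


-- ===== PORT A =====
def capStemsA : List String := ["capacity", "storage", "store", "shelf", "warehouse"]

def isCapacityLikeA (name : String) : Bool :=
  let low := PySem.Str.lower name
  capStemsA.any (fun stem => PySem.Str.isIn stem low)

-- first loop of A: 'for p in self_props: if "Capacity" in p: return p'
def loopExactA : List String → Option String
  | [] => none
  | p :: rest => if PySem.Str.isIn "Capacity" p then some p else loopExactA rest

-- second loop of A: 'for p in self_props: if _is_capacity_like(p): return p'
def loopLikeA : List String → Option String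
  | [] => none
  | p :: rest => if isCapacityLikeA p then some p else loopLikeA rest

def pick_capacity_py (self_props : List String) : String :=
  match loopExactA self_props with
  | some p => p
  | none =>
    match loopLikeA self_props with
    | some p => p
    | none => ""

-- ===== PORT B =====
def capStemsB : List String := ["capacity", "storage", "store", "shelf", "warehouse"]

-- B's single loop: early return on exact hit, record first stem-like fallback
def loopB : List String → Option String → String
  | [], fallback => fallback.getD ""
  | p :: rest, fallback =>
    if PySem.Str.isIn "Capacity" p then p
    else
      loopB rest
        (if fallback.isNone &&
            (capStemsB.any (fun stem => PySem.Str.isIn stem (PySem.Str.lower p)))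
         then some p else fallback)

def pick_capacity_py_alt (self_props : List String) : String :=
  loopB self_props none

-- ===== PRECONDITION & SPEC =====
def Spec_pick_capacity_py (self_props : List String) (out : String) : Prop := out = pick_capacity_py_alt self_props
instance (self_props : List String) (out : String) : Decidable (Spec_pick_capacity_py self_props out) := by unfold Spec_pick_capacity_py; infer_instance

-- ===== CLAIM (what is proved, stated in full; the proofs are below) =====
def Claim_equal_pick_capacity_py : Prop := ∀ (self_props : List String), Dom_pick_capacity_py self_props → Spec_pick_capacity_py self_props (pick_capacity_py self_props)

-- ===== LEMMAS AND PROOFS =====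

-- B's single pass equals: first exact hit, else the pre-seeded fallback, else A's stem scan.
theorem loopB_eq (xs : List String) (fb : Option String) :
    loopB xs fb = (loopExactA xs).getD (fb.getD ((loopLikeA xs).getD "")) := by
  induction xs generalizing fb with
  | nil => cases fb <;> simp [loopB, loopExactA, loopLikeA]
  | cons p rest ih =>
    simp only [loopB, loopExactA, loopLikeA]
    cases hex : PySem.Str.isIn "Capacity" p with
    | true => simp
    | false =>
      simp only [Bool.false_eq_true, if_false]
      cases fb with
      | some q => simp [ih]
      | none =>
        have hstem : (capStemsB.any fun stem => PySem.Str.isIn stem (PySem.Str.lower p))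
            = isCapacityLikeA p := by
          simp only [isCapacityLikeA, capStemsA, capStemsB]
        cases hl : isCapacityLikeA p with
        | true =>
          rw [Option.isNone_none, Bool.true_and, hstem, hl]
          simp [ih]
        | false =>
          rw [Option.isNone_none, Bool.true_and, hstem, hl]
          simp [ih]

-- ===== VERDICT (by name: the statement is the Claim_ definition above) =====
theorem pick_capacity_py_spec : Claim_equal_pick_capacity_py := by
  intro xs _
  show pick_capacity_py xs = pick_capacity_py_alt xs
  unfold pick_capacity_py pick_capacity_py_alt
  rw [loopB_eq]
  cases loopExactA xs <;> cases loopLikeA xs <;> simp
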